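-- pv_equiv track=rewrite | github.com/Dee66/VectorScan | scripts/telemetry_consumer.py | _normalize_stat_component
-- ===== SOURCE A (Python) =====
-- def _normalize_stat_component(component: str) -> str:
--     cleaned = []
--     for ch in component:
--         if ch.isalnum() or ch in {".", "_"}:
--             cleaned.append(ch.lower())
--         else:
--             cleaned.append("_")
--     normalized = "".join(cleaned).strip(".")
--     while ".." in normalized:
--         normalized = normalized.replace("..", ".")
--     return normalized
-- ===== SOURCE B (Python) =====
-- def _normalize_stat_component(component: str) -> str:
--     raw = "".join(ch.lower() if ch.isalnum() or ch in "._" else "_" for ch in component)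
--     return ".".join(seg for seg in raw.split(".") if seg)
-- ===== Notes on version B (the rewrite author's own statement) =====
-- stated objective: idiomatic
-- what changed: B replaces A's strip of boundary dots plus repeated whole-string double-dot replacement passes with a single tokenization: split the mapped string at dots, drop the empty segments, and rejoin with a dot separator.
import Mathlib
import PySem

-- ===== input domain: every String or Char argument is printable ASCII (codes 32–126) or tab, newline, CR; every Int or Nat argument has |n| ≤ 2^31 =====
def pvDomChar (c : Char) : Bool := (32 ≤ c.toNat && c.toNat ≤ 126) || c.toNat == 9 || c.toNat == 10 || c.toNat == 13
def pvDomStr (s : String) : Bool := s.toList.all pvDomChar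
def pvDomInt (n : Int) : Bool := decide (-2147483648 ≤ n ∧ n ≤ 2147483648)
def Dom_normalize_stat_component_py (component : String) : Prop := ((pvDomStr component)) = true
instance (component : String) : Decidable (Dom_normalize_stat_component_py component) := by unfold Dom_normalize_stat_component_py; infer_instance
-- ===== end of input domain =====

-- B replaces A's boundary-strip plus repeated double-dot replacement passes by a split-at-dots/drop-empty/rejoin tokenization (idiomatic); equivalence proved on all inputs.

-- ===== PORT A =====
-- the 'while ".." in normalized' loop: fuel bounds the iteration count (each pass shortens the string, so the initial length suffices)
def pvLoopA : Nat → String → String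
  | 0, s => s
  | fuel + 1, s =>
    if PySem.Str.isIn ".." s then pvLoopA fuel (PySem.Str.replace s ".." ".") else s

def normalize_stat_component_py (component : String) : String :=
  let cleaned : List Char := component.toList.foldl
    (fun acc ch =>
      if PySem.Chars.isalnum ch || ch == '.' || ch == '_' then acc ++ [PySem.Chars.lowerChar ch]
      else acc ++ ['_']) []
  let normalized := PySem.Str.stripChars (String.ofList cleaned) "."
  pvLoopA normalized.toList.length normalized

-- ===== PORT B =====
def normalize_stat_component_py_alt (component : String) : String :=
  let raw := String.ofList (component.toList.map
    (fun ch =>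
      if PySem.Chars.isalnum ch || ch == '.' || ch == '_' then PySem.Chars.lowerChar ch
      else '_'))
  PySem.Str.join "." (((PySem.Str.split? raw ".").getD []).filter (fun seg => seg != ""))

-- ===== PRECONDITION & SPEC =====
def Spec_normalize_stat_component_py (component : String) (out : String) : Prop := out = normalize_stat_component_py_alt component
instance (component : String) (out : String) : Decidable (Spec_normalize_stat_component_py component out) := by unfold Spec_normalize_stat_component_py; infer_instance

-- ===== CLAIM (what is proved, stated in full; the proofs are below) =====
def Claim_equal_normalize_stat_component_py : Prop := ∀ (component : String), Dom_normalize_stat_component_py component → Spec_normalize_stat_component_py component (normalize_stat_component_py component)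

-- ===== LEMMAS AND PROOFS =====

-- one replace("..", ".") pass over a list of chars
def pvRep : List Char → List Char
  | [] => []
  | [c] => [c]
  | a :: b :: t => if a = '.' ∧ b = '.' then '.' :: pvRep t else a :: pvRep (b :: t)

-- collapse every run of dots to a single dot (the while loop's fixpoint)
def pvSquash : List Char → List Char
  | [] => []
  | [c] => [c]
  | a :: b :: t => if a = '.' ∧ b = '.' then pvSquash (b :: t) else a :: pvSquash (b :: t)

-- does the list contain two adjacent dots?
def pvDD : List Char → Bool
  | [] => false
  | [_] => false
  | a :: b :: t => if a = '.' ∧ b = '.' then true else pvDD (b :: t)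

-- drop trailing dots
def pvRstrip : List Char → List Char
  | [] => []
  | c :: t => if c = '.' then (if pvRstrip t = [] then [] else '.' :: pvRstrip t) else c :: pvRstrip t

-- canonical form of the dot-collapse of the right-stripped list
def pvM : List Char → List Char
  | [] => []
  | c :: t =>
    if c = '.' then (if pvM t = [] then [] else if t.head? = some '.' then pvM t else '.' :: pvM t)
    else c :: pvM t

-- canonical form of the whole normalization (strip both ends, collapse runs)
def pvL : List Char → List Char
  | [] => []
  | c :: t => if c = '.' then pvL t else c :: pvM t

-- split on '.': (first segment, remaining segments)
def pvSp : List Char → List Char × List (List Char)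
  | [] => ([], [])
  | c :: t => if c = '.' then ([], (pvSp t).1 :: (pvSp t).2) else (c :: (pvSp t).1, (pvSp t).2)

-- ".".join
def pvJoin : List (List Char) → List Char
  | [] => []
  | [x] => x
  | x :: y :: r => x ++ '.' :: pvJoin (y :: r)

-- the per-character mapping both programs share
def pvG (ch : Char) : Char :=
  if PySem.Chars.isalnum ch || ch == '.' || ch == '_' then PySem.Chars.lowerChar ch else '_'

lemma pv_foldl_clean (l : List Char) (acc : List Char) :
    l.foldl (fun acc ch =>
      if PySem.Chars.isalnum ch || ch == '.' || ch == '_' then acc ++ [PySem.Chars.lowerChar ch]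
      else acc ++ ['_']) acc = acc ++ l.map pvG := by
  induction l generalizing acc with
  | nil => simp
  | cons c t ih =>
    simp only [List.foldl_cons, List.map_cons, ih, pvG]
    by_cases h : (PySem.Chars.isalnum c || c == '.' || c == '_') = true <;> simp [h]

lemma pv_squash_cons (c : Char) (t : List Char) :
    pvSquash (c :: t) = if c = '.' ∧ t.head? = some '.' then pvSquash t else c :: pvSquash t := by
  cases t with
  | nil => simp [pvSquash]
  | cons b t' => simp [pvSquash]


lemma pv_head_rep (l : List Char) : (pvRep l).head? = l.head? := by
  induction l using pvRep.induct with
  | case1 => simp [pvRep]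
  | case2 c => simp [pvRep]
  | case3 a b t h ih => simp [pvRep, h]
  | case4 a b t h ih => simp [pvRep, h]


lemma pv_squash_rep (l : List Char) : pvSquash (pvRep l) = pvSquash l := by
  induction l using pvRep.induct with
  | case1 => simp [pvRep]
  | case2 c => simp [pvRep]
  | case3 a b t h ih =>
    obtain ⟨ha, hb⟩ := h
    subst ha hb
    rw [pvRep, if_pos ⟨rfl, rfl⟩,
        show pvSquash ('.' :: '.' :: t) = pvSquash ('.' :: t) from by
          rw [pvSquash, if_pos ⟨rfl, rfl⟩],
        pv_squash_cons, pv_squash_cons, pv_head_rep, ih]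
  | case4 a b t h ih =>
    rw [pvRep, if_neg h,
        show pvSquash (a :: b :: t) = a :: pvSquash (b :: t) from by
          rw [pvSquash, if_neg h],
        pv_squash_cons, pv_head_rep, ih]
    have hn : ¬(a = '.' ∧ (b :: t).head? = some '.') := by simpa using h
    rw [if_neg hn]


lemma pv_squash_nil_iff (l : List Char) : pvSquash l = [] ↔ l = [] := by
  induction l using pvSquash.induct with
  | case1 => simp [pvSquash]
  | case2 c => simp [pvSquash]
  | case3 a b t h ih =>
    rw [pvSquash, if_pos h]
    simp [ih]
  | case4 a b t h ih =>
    rw [pvSquash, if_neg h]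
    simp


lemma pv_dd_false_squash (l : List Char) (h : pvDD l = false) : pvSquash l = l := by
  induction l using pvSquash.induct with
  | case1 => simp [pvSquash]
  | case2 c => simp [pvSquash]
  | case3 a b t hab ih =>
    rw [pvDD, if_pos hab] at h
    exact absurd h (by simp)
  | case4 a b t hab ih =>
    rw [pvDD, if_neg hab] at h
    rw [pvSquash, if_neg hab, ih h]


lemma pv_infix_iff_dd (l : List Char) : ['.', '.'] <:+: l ↔ pvDD l = true := by
  induction l using pvDD.induct with
  | case1 => simp [pvDD]
  | case2 c =>
    simp only [pvDD, Bool.false_eq_true, iff_false]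
    intro hinf
    have := hinf.length_le
    simp at this
  | case3 a b t hab =>
    obtain ⟨ha, hb⟩ := hab
    subst ha hb
    rw [pvDD, if_pos ⟨rfl, rfl⟩]
    simp only [iff_true]
    exact ⟨[], t, rfl⟩
  | case4 a b t hab ih =>
    rw [pvDD, if_neg hab, ← ih]
    constructor
    · intro hinf
      rcases (List.infix_cons_iff).1 hinf with hpre | hinf'
      · obtain ⟨u, hu⟩ := hpre
        injection hu with h1 h2
        injection h2 with h3 h4
        exact absurd ⟨h1.symm, h3.symm⟩ hab
      · exact hinf'
    · intro hinf
      exact List.infix_cons hinf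


lemma pv_len_rep_le (l : List Char) : (pvRep l).length ≤ l.length := by
  induction l using pvRep.induct with
  | case1 => simp [pvRep]
  | case2 c => simp [pvRep]
  | case3 a b t h ih =>
    rw [pvRep, if_pos h]
    simp only [List.length_cons]
    omega
  | case4 a b t h ih =>
    rw [pvRep, if_neg h]
    simp only [List.length_cons] at ih ⊢
    omega


lemma pv_len_rep_lt (l : List Char) (h : pvDD l = true) : (pvRep l).length < l.length := by
  induction l using pvRep.induct with
  | case1 => simp [pvDD] at h
  | case2 c => simp [pvDD] at h
  | case3 a b t hab ih =>
    rw [pvRep, if_pos hab]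
    have := pv_len_rep_le t
    simp only [List.length_cons]
    omega
  | case4 a b t hab ih =>
    rw [pvDD, if_neg hab] at h
    rw [pvRep, if_neg hab]
    have := ih h
    simp only [List.length_cons] at this ⊢
    omega


lemma pv_rep_go (fuel : Nat) (l acc : List Char) (h : l.length ≤ fuel) :
    PySem.Chars.replace.go ['.', '.'] ['.'] fuel l acc = acc.reverse ++ pvRep l := by
  induction fuel generalizing l acc with
  | zero =>
    have hl : l = [] := List.eq_nil_of_length_eq_zero (Nat.le_zero.1 h)
    subst hl
    simp [PySem.Chars.replace.go, pvRep]
  | succ f ih =>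
    cases l with
    | nil => simp [PySem.Chars.replace.go, pvRep]
    | cons c t =>
      rw [PySem.Chars.replace.go]
      cases hp : (['.', '.'] : List Char).isPrefixOf (c :: t) with
      | true =>
        obtain ⟨u, hu⟩ := List.isPrefixOf_iff_prefix.1 hp
        injection hu with h1 h2
        have h2' : '.' :: u = t := h2
        subst h1
        subst h2'
        have hlen : u.length ≤ f := by
          simp only [List.length_cons] at h
          omega
        rw [if_pos rfl]
        have hdrop : List.drop (['.', '.'] : List Char).length ('.' :: '.' :: u) = u := rfl
        rw [hdrop]
        rw [show (['.'] : List Char).reverse ++ acc = '.' :: acc from rfl]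
        rw [ih u ('.' :: acc) hlen]
        rw [show pvRep ('.' :: '.' :: u) = '.' :: pvRep u from by
          rw [pvRep, if_pos ⟨rfl, rfl⟩]]
        simp
      | false =>
        rw [if_neg (by simp)]
        have hlen : t.length ≤ f := by
          simp only [List.length_cons] at h
          omega
        rw [ih t (c :: acc) hlen]
        have hrep : pvRep (c :: t) = c :: pvRep t := by
          cases t with
          | nil => rfl
          | cons b t' =>
            have hne : ¬(c = '.' ∧ b = '.') := by
              rintro ⟨rfl, rfl⟩
              simp [List.isPrefixOf] at hp
            rw [pvRep, if_neg hne]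
        rw [hrep]
        simp


lemma pv_replace_eq_rep (l : List Char) : PySem.Chars.replace l ['.', '.'] ['.'] = pvRep l := by
  rw [PySem.Chars.replace]
  rw [if_neg (by simp)]
  simpa using pv_rep_go l.length l [] (le_refl _)


lemma pv_loopA_eq (fuel : Nat) (s : String) (h : s.toList.length ≤ fuel) :
    pvLoopA fuel s = String.ofList (pvSquash s.toList) := by
  induction fuel generalizing s with
  | zero =>
    have hl : s.toList = [] := List.eq_nil_of_length_eq_zero (Nat.le_zero.1 h)
    rw [pvLoopA, hl, show pvSquash [] = [] from rfl, ← hl, String.ofList_toList]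
  | succ f ih =>
    rw [pvLoopA]
    cases hin : PySem.Str.isIn ".." s with
    | false =>
      have hninf : ¬(['.', '.'] <:+: s.toList) := by
        intro hinf
        have : PySem.Str.isIn ".." s = true := by
          rw [PySem.Str.isIn_iff_infix]
          exact hinf
        rw [hin] at this
        exact absurd this (by simp)
      have hdd : pvDD s.toList = false := by
        cases hdd : pvDD s.toList with
        | false => rfl
        | true => exact absurd ((pv_infix_iff_dd s.toList).2 hdd) hninf
      rw [if_neg (by simp), pv_dd_false_squash _ hdd, String.ofList_toList]
    | true =>
      rw [if_pos rfl]
      have hdd : pvDD s.toList = true :=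
        (pv_infix_iff_dd s.toList).1 ((PySem.Str.isIn_iff_infix ".." s).1 hin)
      have htl : (PySem.Str.replace s ".." ".").toList = pvRep s.toList := by
        rw [PySem.Str.toList_replace]
        exact pv_replace_eq_rep s.toList
      have hlen : (PySem.Str.replace s ".." ".").toList.length ≤ f := by
        rw [htl]
        have := pv_len_rep_lt s.toList hdd
        omega
      rw [ih _ hlen, htl, pv_squash_rep]


lemma pv_rstrip_eq (l : List Char) :
    pvRstrip l = (List.dropWhile (fun c => (['.'] : List Char).contains c) l.reverse).reverse := by
  induction l with
  | nil => rfl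
  | cons c t ih =>
    have hp : ((fun c => (['.'] : List Char).contains c) '.') = true := by simp
    by_cases hc : c = '.'
    · subst hc
      rw [pvRstrip, ih, List.reverse_cons, List.dropWhile_append, if_pos rfl]
      by_cases he : List.dropWhile (fun c => (['.'] : List Char).contains c) t.reverse = []
      · rw [if_pos (by rw [he]; rfl), if_pos (by rw [he]; rfl),
          List.dropWhile_cons_of_pos hp, List.dropWhile_nil, List.reverse_nil]
      · rw [if_neg (fun hx => he (by rwa [List.reverse_eq_nil_iff] at hx)), if_neg (fun hx => he (List.isEmpty_iff.1 hx)), List.reverse_append]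
        rfl
    · have hpc : ¬((fun c => (['.'] : List Char).contains c) c = true) := by simp [hc]
      rw [pvRstrip, ih, List.reverse_cons, List.dropWhile_append, if_neg hc]
      by_cases he : List.dropWhile (fun c => (['.'] : List Char).contains c) t.reverse = []
      · rw [if_pos (by rw [he]; rfl), List.dropWhile_cons_of_neg hpc, he, List.reverse_nil]
        rfl
      · rw [if_neg (fun hx => he (List.isEmpty_iff.1 hx)), List.reverse_append]
        rfl

lemma pv_head_rstrip (t : List Char) (h : pvRstrip t ≠ []) : (pvRstrip t).head? = t.head? := by
  cases t with
  | nil => exact absurd rfl h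
  | cons c t' =>
    rw [pvRstrip] at h ⊢
    by_cases hc : c = '.'
    · subst hc
      rw [if_pos rfl] at h ⊢
      by_cases he : pvRstrip t' = []
      · simp [he] at h
      · simp [he]
    · simp [if_neg hc]


lemma pv_squash_rstrip (t : List Char) : pvSquash (pvRstrip t) = pvM t := by
  induction t with
  | nil => rfl
  | cons c t' ih =>
    rw [pvRstrip, pvM]
    by_cases hc : c = '.'
    · subst hc
      rw [if_pos rfl, if_pos rfl]
      by_cases he : pvRstrip t' = []
      · rw [if_pos he]
        rw [he] at ih
        rw [← ih]
        simp [pvSquash]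
      · rw [if_neg he]
        have hm : pvM t' ≠ [] := by
          rw [← ih]
          intro hx
          exact he ((pv_squash_nil_iff _).1 hx)
        rw [if_neg hm, pv_squash_cons, pv_head_rstrip t' he, ih]
        by_cases hh : t'.head? = some '.'
        · rw [if_pos ⟨rfl, hh⟩, if_pos hh]
        · rw [if_neg (by rintro ⟨-, hx⟩; exact hh hx), if_neg hh]
    · rw [if_neg hc, if_neg hc, pv_squash_cons, if_neg (by rintro ⟨rfl, -⟩; exact hc rfl), ih]


lemma pv_M_dropWhile (l : List Char) :
    pvM (List.dropWhile (fun c => (['.'] : List Char).contains c) l) = pvL l := by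
  induction l with
  | nil => rfl
  | cons c t ih =>
    rw [pvL]
    by_cases hc : c = '.'
    · subst hc
      rw [if_pos rfl, List.dropWhile_cons_of_pos (by simp), ih]
    · rw [if_neg hc, List.dropWhile_cons_of_neg (by simp [hc]), pvM, if_neg hc]


lemma pv_sp_go (fuel : Nat) (l cur : List Char) (acc : List (List Char)) (h : l.length ≤ fuel) :
    PySem.Chars.splitOn.go ['.'] fuel l cur acc =
      acc.reverse ++ (cur.reverse ++ (pvSp l).1) :: (pvSp l).2 := by
  induction fuel generalizing l cur acc with
  | zero =>
    have hl : l = [] := List.eq_nil_of_length_eq_zero (Nat.le_zero.1 h)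
    subst hl
    simp [PySem.Chars.splitOn.go, pvSp]
  | succ f ih =>
    cases l with
    | nil => simp [PySem.Chars.splitOn.go, pvSp]
    | cons c rest =>
      rw [PySem.Chars.splitOn.go]
      have hlen : rest.length ≤ f := by
        simp only [List.length_cons] at h
        omega
      by_cases hc : c = '.'
      · subst hc
        rw [if_pos (by simp [List.isPrefixOf])]
        rw [show List.drop (['.'] : List Char).length ('.' :: rest) = rest from rfl]
        rw [ih rest [] (cur.reverse :: acc) hlen]
        rw [pvSp, if_pos rfl]
        simp
      · rw [if_neg (by simp [List.isPrefixOf, Ne.symm hc])]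
        rw [ih rest (c :: cur) acc hlen]
        rw [pvSp, if_neg hc]
        simp

lemma pv_splitOn_eq (l : List Char) :
    PySem.Chars.splitOn l ['.'] = (pvSp l).1 :: (pvSp l).2 := by
  rw [PySem.Chars.splitOn]
  rw [pv_sp_go (l.length + 1) l [] [] (by omega)]
  simp


lemma pv_intercalate_eq_join (ps : List (List Char)) : (['.'] : List Char).intercalate ps = pvJoin ps := by
  induction ps using pvJoin.induct with
  | case1 => simp [List.intercalate, pvJoin]
  | case2 x => simp [List.intercalate, pvJoin]
  | case3 x y r ih =>
    rw [pvJoin, ← ih]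
    rw [show (['.'] : List Char).intercalate (x :: y :: r) =
        x ++ ['.'] ++ (['.'] : List Char).intercalate (y :: r) from by
      simp [List.intercalate, List.intersperse]]
    simp

lemma pv_join_cons (x : List Char) (r : List (List Char)) :
    pvJoin (x :: r) = if r = [] then x else x ++ '.' :: pvJoin r := by
  cases r with
  | nil => rw [if_pos rfl, pvJoin]
  | cons y r' => rw [if_neg (by simp), pvJoin]


lemma pv_M_nil_iff (t : List Char) : pvM t = [] ↔ t.all (· == '.') = true := by
  induction t with
  | nil => simp [pvM]
  | cons c t ih =>
    by_cases hc : c = '.'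
    · subst hc
      rw [pvM, if_pos rfl]
      by_cases hm : pvM t = []
      · rw [if_pos hm]
        simp [ih.1 hm]
      · rw [if_neg hm]
        have h2 : ¬(t.all (· == '.') = true) := fun hx => hm (ih.2 hx)
        by_cases hh : t.head? = some '.' <;> simp [hh, h2, hm]
    · simp [pvM, hc]


lemma pv_filter_nil_iff (t : List Char) :
    ((pvSp t).1 :: (pvSp t).2).filter (fun x => !x.isEmpty) = [] ↔ t.all (· == '.') = true := by
  induction t with
  | nil => simp [pvSp]
  | cons c t ih =>
    by_cases hc : c = '.'
    · subst hc
      rw [pvSp, if_pos rfl]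
      simpa using ih
    · rw [pvSp, if_neg hc]
      simp [hc]


lemma pv_M_eq_L_of_head_ne (t : List Char) (h : t.head? ≠ some '.') : pvM t = pvL t := by
  cases t with
  | nil => rfl
  | cons c t' =>
    have hc : c ≠ '.' := by
      intro hx
      exact h (by rw [hx]; rfl)
    rw [pvM, if_neg hc, pvL, if_neg hc]


lemma pv_M_eq_dot_L (t : List Char) (h1 : t.head? = some '.') (h2 : pvM t ≠ []) :
    pvM t = '.' :: pvL t := by
  induction t with
  | nil => simp at h1
  | cons c u ih =>
    have hc : c = '.' := by
      simpa using h1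
    subst hc
    rw [pvM, if_pos rfl] at h2 ⊢
    have hm : pvM u ≠ [] := by
      intro hx
      rw [if_pos hx] at h2
      exact h2 rfl
    rw [if_neg hm] at h2 ⊢
    rw [pvL, if_pos rfl]
    by_cases hh : u.head? = some '.'
    · rw [if_pos hh]
      exact ih hh hm
    · rw [if_neg hh, pv_M_eq_L_of_head_ne u hh]


lemma pv_PJ (l : List Char) :
    pvJoin (((pvSp l).1 :: (pvSp l).2).filter (fun x => !x.isEmpty)) = pvL l ∧
    pvM l = (if ((pvSp l).2).filter (fun x => !x.isEmpty) = [] then (pvSp l).1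
             else (pvSp l).1 ++ '.' :: pvJoin (((pvSp l).2).filter (fun x => !x.isEmpty))) := by
  induction l with
  | nil => exact ⟨rfl, by simp [pvSp, pvM]⟩
  | cons c t ih =>
    obtain ⟨ih1, ih2⟩ := ih
    by_cases hc : c = '.'
    · subst hc
      constructor
      · rw [pvSp, if_pos rfl, pvL, if_pos rfl]
        simpa using ih1
      · rw [pvSp, if_pos rfl, pvM, if_pos rfl]
        simp only []
        by_cases hm : pvM t = []
        · rw [if_pos hm]
          have hf : List.filter (fun x => !x.isEmpty) ((pvSp t).1 :: (pvSp t).2) = [] :=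
            (pv_filter_nil_iff t).2 ((pv_M_nil_iff t).1 hm)
          rw [if_pos hf]
        · rw [if_neg hm]
          have hf : ¬(List.filter (fun x => !x.isEmpty) ((pvSp t).1 :: (pvSp t).2) = []) := by
            intro hx
            exact hm ((pv_M_nil_iff t).2 ((pv_filter_nil_iff t).1 hx))
          rw [if_neg hf, ih1, List.nil_append]
          by_cases hh : t.head? = some '.'
          · rw [if_pos hh]
            exact pv_M_eq_dot_L t hh hm
          · rw [if_neg hh]
            rw [pv_M_eq_L_of_head_ne t hh]
    · have hfil : (((pvSp (c :: t)).1 :: (pvSp (c :: t)).2).filter (fun x => !x.isEmpty)) =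
          (c :: (pvSp t).1) :: (((pvSp t).2).filter (fun x => !x.isEmpty)) := by
        rw [pvSp, if_neg hc]
        simp
      constructor
      · rw [hfil, pv_join_cons, pvL, if_neg hc, ih2]
        by_cases hz : ((pvSp t).2).filter (fun x => !x.isEmpty) = []
        · rw [if_pos hz, if_pos hz]
        · rw [if_neg hz, if_neg hz]
          simp
      · rw [pvSp, if_neg hc]
        simp only []
        rw [pvM, if_neg hc, ih2]
        by_cases hz : ((pvSp t).2).filter (fun x => !x.isEmpty) = []
        · rw [if_pos hz, if_pos hz]
        · rw [if_neg hz, if_neg hz]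
          simp


-- ===== VERDICT (by name: the statement is the Claim_ definition above) =====
lemma pv_ne_empty : (fun seg => seg != "") ∘ String.ofList = fun x : List Char => !x.isEmpty := by
  funext x
  cases x with
  | nil => decide
  | cons c t =>
    have h : ¬(String.ofList (c :: t) = "") := by
      intro h
      have := congrArg String.toList h
      simp at this
    simp [Function.comp, bne, h]

theorem normalize_stat_component_py_spec : Claim_equal_normalize_stat_component_py := by
  intro component _hdom
  unfold Spec_normalize_stat_component_py
  simp only [normalize_stat_component_py, normalize_stat_component_py_alt]
  have hg : (fun ch => if PySem.Chars.isalnum ch || ch == '.' || ch == '_' then PySem.Chars.lowerChar ch else '_') = pvG := by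
    funext ch
    rfl
  rw [pv_foldl_clean, List.nil_append, hg]
  have hdot : ("." : String).toList = ['.'] := rfl
  -- A side
  have hu : (PySem.Str.stripChars (String.ofList (component.toList.map pvG)) ".").toList =
      pvRstrip (List.dropWhile (fun c => (['.'] : List Char).contains c) (component.toList.map pvG)) := by
    rw [PySem.Str.toList_stripChars, String.toList_ofList, hdot, pv_rstrip_eq]
    rfl
  rw [pv_loopA_eq _ _ (le_refl _), hu, pv_squash_rstrip, pv_M_dropWhile]
  -- B side
  have hsplit : PySem.Str.split? (String.ofList (component.toList.map pvG)) "." =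
      some ((PySem.Chars.splitOn (component.toList.map pvG) ['.']).map String.ofList) := by
    rw [PySem.Str.split?, String.toList_ofList, hdot, PySem.Chars.split?, if_neg (by simp)]
    rfl
  rw [hsplit, Option.getD_some, pv_splitOn_eq]
  rw [List.filter_map, pv_ne_empty]
  unfold PySem.Str.join PySem.Chars.join
  rw [hdot, List.map_map,
    show String.toList ∘ String.ofList = id from funext fun x => String.toList_ofList,
    List.map_id, pv_intercalate_eq_join, (pv_PJ (component.toList.map pvG)).1]
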